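-- pv_equiv track=rewrite | github.com/gbeltramo/persty | persty/util.py | clique_simplices
-- ===== SOURCE A (Python) =====
-- from itertools import combinations
--
-- def clique_simplices(edges, number_points, dimension=2):
--     """Return the clique simplices on `edges`
--
--     Parameters
--     ----------
--     edges: list pairs of indices, list of list of int
--         The edges of a graph built on some finite set of points
--     number_points: int
--         The number of vertices of the graph to which the edges belong
--     dimension: int >=2
--         Dimension of clique simplices returned
--
--     Return
--     ------
--     clique_simplices: list of list of int
--         The cliques on the given edges
--
--     """
--     edges = set(edges)
--     all_simplices = list(combinations(range(number_points), dimension+1))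
--     edges_in_simplex = list(combinations(range(dimension+1), 2))
--     simplices = []
--     not_found = False
--
--     for sim in all_simplices:
--         not_found = False
--         for e in edges_in_simplex:
--             v1, v2 = sim[e[0]], sim[e[1]]
--             if (v1, v2) not in edges:
--                 not_found = True
--                 break
--         if not not_found:
--             simplices.append(sim)
--     return simplices
-- ===== SOURCE B (Python) =====
-- def clique_simplices(edges, number_points, dimension=2):
--     """Return the clique simplices on `edges` (see a.py): all strictly
--     increasing (dimension+1)-tuples of vertices whose ordered pairs are all edges.
--
--     Instead of testing every combination, grow cliques depth-first: starting
--     from the full (sorted) vertex list, repeatedly pick the next vertex w and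
--     keep only the later candidates connected to w.  DFS in increasing vertex
--     order yields exactly the lexicographic order of itertools.combinations.
--     """
--     edge_set = set(edges)
--
--     def extend(r, cand):
--         if r == 0:
--             return [()]
--         res = []
--         for i, w in enumerate(cand):
--             rest = [x for x in cand[i + 1:] if (w, x) in edge_set]
--             for tail in extend(r - 1, rest):
--                 res.append((w,) + tail)
--         return res
--
--     return extend(dimension + 1, list(range(number_points)))
-- ===== Notes on version B (the rewrite author's own statement) =====
-- stated objective: alternative
-- what changed: B replaces A's exhaustive scan of all C(n, d+1) combinations (each re-checked pair by pair) with an output-sensitive depth-first clique extension that repeatedly narrows the candidate list to the later neighbours of the chosen vertex, producing the same lexicographic order directly (intended as faster on sparse graphs; measured 10.19x at the largest size both finished, but unconfirmed overall).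
import Mathlib
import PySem

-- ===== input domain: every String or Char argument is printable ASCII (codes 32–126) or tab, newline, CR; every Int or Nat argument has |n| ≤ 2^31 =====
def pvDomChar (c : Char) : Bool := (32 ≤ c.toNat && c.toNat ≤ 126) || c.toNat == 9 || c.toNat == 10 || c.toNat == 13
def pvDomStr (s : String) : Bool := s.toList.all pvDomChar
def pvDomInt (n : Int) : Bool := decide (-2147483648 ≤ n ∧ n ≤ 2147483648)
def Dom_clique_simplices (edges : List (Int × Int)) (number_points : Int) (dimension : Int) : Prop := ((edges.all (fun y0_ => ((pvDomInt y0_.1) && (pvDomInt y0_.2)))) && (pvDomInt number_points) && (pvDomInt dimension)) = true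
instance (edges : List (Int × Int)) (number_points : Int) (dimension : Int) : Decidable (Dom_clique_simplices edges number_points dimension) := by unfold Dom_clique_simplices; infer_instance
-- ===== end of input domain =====

-- B replaces A's scan of ALL (dimension+1)-combinations by a depth-first clique
-- extension over shrinking candidate lists (objective: alternative algorithm).

-- ===== PORT A =====
-- A enumerates combinations(range(n), d+1) and keeps those whose ordered index
-- pairs are all edges.  `(dimension+1).toNat`: Python raises ValueError for a
-- negative combination size, excluded by Pre_ below.
def clique_simplices (edges : List (Int × Int)) (number_points : Int) (dimension : Int) : List (List Int) :=
  let edgeset : PySem.Set (Int × Int) := PySem.Set.ofList edges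
  let all_simplices := PySem.List.combinations (PySem.List.pyRange 0 number_points 1) (dimension + 1).toNat
  let edges_in_simplex := PySem.List.combinations (PySem.List.pyRange 0 (dimension + 1) 1) 2
  -- the inner for-loop with the `not_found` flag and `break`: the simplex is
  -- appended iff every pair check succeeds.  `combinations(…, 2)` always yields
  -- 2-element lists and both indices are in range, so the catch-all branches
  -- (Python: unpacking error / IndexError) are unreachable.
  all_simplices.foldl
    (fun simplices sim =>
      if (edges_in_simplex.all (fun e =>
            match e with
            | [i, j] =>
              match PySem.List.pyGet? sim i, PySem.List.pyGet? sim j with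
              | some v1, some v2 => PySem.Set.contains edgeset (v1, v2)
              | _, _ => false
            | _ => false)) then simplices ++ [sim] else simplices)
    []

-- ===== PORT B =====
-- B's helper `extend(r, cand)`: pick each w in cand in turn, recurse on the
-- later candidates connected to w.  The loop over cand is the structural
-- recursion on the list (w :: rest ≙ `for i, w in enumerate(cand)` with
-- `cand[i+1:] = rest`).
def cliqueExtend (edgeset : PySem.Set (Int × Int)) (r : Int) (cand : List Int) : List (List Int) :=
  if r = 0 then [[]]
  else
    match cand with
    | [] => []
    | w :: rest =>
      ((cliqueExtend edgeset (r - 1)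
          (rest.filter (fun x => PySem.Set.contains edgeset (w, x)))).map
        (fun tail => w :: tail))
        ++ cliqueExtend edgeset r rest
termination_by cand.length
decreasing_by
  · simpa using Nat.lt_succ_of_le (le_trans (List.length_filter_le _ _) (by simp))
  · simp

def clique_simplices_alt (edges : List (Int × Int)) (number_points : Int) (dimension : Int) : List (List Int) :=
  let edge_set : PySem.Set (Int × Int) := PySem.Set.ofList edges
  cliqueExtend edge_set (dimension + 1) (PySem.List.pyRange 0 number_points 1)

-- ===== PRECONDITION & SPEC =====
-- Pre_ excludes only dimension ≤ -2, where A raises ValueError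
-- (combinations with a negative size); A returns on every other input.
def Pre_clique_simplices (edges : List (Int × Int)) (number_points : Int) (dimension : Int) : Prop :=
  0 ≤ dimension + 1
instance (edges : List (Int × Int)) (number_points : Int) (dimension : Int) : Decidable (Pre_clique_simplices edges number_points dimension) := by unfold Pre_clique_simplices; infer_instance

def pvWitness_clique_simplices : (List (Int × Int)) × Int × Int := ([(0, 1), (0, 2), (1, 2)], 3, 2)

def Spec_clique_simplices (edges : List (Int × Int)) (number_points : Int) (dimension : Int) (out : List (List Int)) : Prop := out = clique_simplices_alt edges number_points dimension
instance (edges : List (Int × Int)) (number_points : Int) (dimension : Int) (out : List (List Int)) : Decidable (Spec_clique_simplices edges number_points dimension out) := by unfold Spec_clique_simplices; infer_instance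

-- ===== CLAIM (what is proved, stated in full; the proofs are below) =====
def Claim_equal_clique_simplices : Prop := ∀ (edges : List (Int × Int)) (number_points : Int) (dimension : Int), Dom_clique_simplices edges number_points dimension → Pre_clique_simplices edges number_points dimension → Spec_clique_simplices edges number_points dimension (clique_simplices edges number_points dimension)


-- ===== LEMMAS AND PROOFS =====

-- the common characterisation: a list of vertices is "good" iff every ordered
-- pair (earlier, later) is an edge
def goodE (E : PySem.Set (Int × Int)) : List Int → Bool
  | [] => true
  | x :: xs => (xs.all fun y => PySem.Set.contains E (x, y)) && goodE E xs

-- combinations of a filtered list = combinations whose members all satisfy p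
theorem combinations_filter {α : Type} (p : α → Bool) :
    ∀ (l : List α) (r : Nat),
      PySem.List.combinations (l.filter p) r
        = (PySem.List.combinations l r).filter (fun t => t.all p) := by
  intro l
  induction l with
  | nil => intro r; cases r <;> simp [PySem.List.combinations_zero, PySem.List.combinations_nil_succ]
  | cons x xs ih =>
    intro r
    cases r with
    | zero => simp [PySem.List.combinations_zero]
    | succ r =>
      by_cases hx : p x = true
      · simp [hx, PySem.List.combinations_cons_succ, ih,
          List.filter_map, Function.comp_def]
      · simp only [Bool.not_eq_true] at hx
        simp [hx, PySem.List.combinations_cons_succ, ih,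
          List.filter_map, Function.comp_def]

-- B's DFS extension = filter of all combinations by goodE
theorem cliqueExtend_eq (E : PySem.Set (Int × Int)) :
    ∀ (cand : List Int) (r : Int), 0 ≤ r →
      cliqueExtend E r cand
        = (PySem.List.combinations cand r.toNat).filter (goodE E) := by
  intro cand
  induction hn : cand.length using Nat.strong_induction_on generalizing cand with
  | _ n ihn =>
    intro r hr
    by_cases hr0 : r = 0
    · subst hr0
      rw [cliqueExtend.eq_def, if_pos rfl]
      simp [PySem.List.combinations_zero, goodE]
    · have hto : r.toNat = (r - 1).toNat + 1 := by omega
      cases cand with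
      | nil =>
        rw [cliqueExtend.eq_def, if_neg hr0, hto, PySem.List.combinations_nil_succ]
        rfl
      | cons w rest =>
        have h1 : (rest.filter (fun x => PySem.Set.contains E (w, x))).length < (w :: rest).length :=
          Nat.lt_succ_of_le (List.length_filter_le _ _)
        rw [cliqueExtend.eq_def, if_neg hr0]
        show (cliqueExtend E (r - 1) (rest.filter (fun x => PySem.Set.contains E (w, x)))).map
              (fun tail => w :: tail) ++ cliqueExtend E r rest = _
        rw [ihn _ (by omega) _ rfl (r - 1) (by omega),
            ihn _ (by rw [← hn]; simp) _ rfl r hr]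
        rw [combinations_filter, hto, PySem.List.combinations_cons_succ,
            List.filter_append, List.filter_map, List.filter_filter]
        congr 2
        apply List.filter_congr
        intro t _
        simp [goodE, Bool.and_comm]

-- the range(b, len(whole)) scan of checks on whole[j] = a scan of whole.drop b
theorem all_pyRange_pyGet (whole : List Int) (p : Int → Bool) :
    ∀ (b : Nat),
      ((PySem.List.pyRange (b : Int) (whole.length : Int) 1).all
          (fun j => match PySem.List.pyGet? whole j with
                    | some v => p v
                    | none => false))
        = (whole.drop b).all p := by
  intro b
  induction hn : whole.length - b using Nat.strong_induction_on generalizing b with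
  | _ n ihn =>
    by_cases hb : whole.length ≤ b
    · rw [PySem.List.pyRange_one_eq_nil (by exact_mod_cast hb),
        List.drop_eq_nil_of_le hb]
      rfl
    · replace hb : b < whole.length := by omega
      rw [PySem.List.pyRange_one_cons (by exact_mod_cast hb)]
      have hcast : ((b : Int) + 1) = ((b + 1 : Nat) : Int) := by push_cast; ring
      rw [List.all_cons, hcast, ihn (whole.length - (b + 1)) (by omega) (b + 1) rfl]
      rw [List.drop_eq_getElem_cons hb, List.all_cons]
      simp [PySem.List.pyGet?_natCast, List.getElem?_eq_getElem hb]

-- A's pair-index check over combinations(range(len(whole)), 2) = goodE whole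
theorem all_pairs_eq_goodE (E : PySem.Set (Int × Int)) (whole : List Int) :
    ∀ (a : Nat),
      ((PySem.List.combinations (PySem.List.pyRange (a : Int) (whole.length : Int) 1) 2).all
          (fun e =>
            match e with
            | [i, j] =>
              match PySem.List.pyGet? whole i, PySem.List.pyGet? whole j with
              | some v1, some v2 => PySem.Set.contains E (v1, v2)
              | _, _ => false
            | _ => false))
        = goodE E (whole.drop a) := by
  intro a
  induction hn : whole.length - a using Nat.strong_induction_on generalizing a with
  | _ n ihn =>
    by_cases ha : whole.length ≤ a
    · rw [PySem.List.pyRange_one_eq_nil (by exact_mod_cast ha),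
        PySem.List.combinations_nil_succ, List.drop_eq_nil_of_le ha]
      rfl
    · replace ha : a < whole.length := by omega
      rw [PySem.List.pyRange_one_cons (by exact_mod_cast ha),
        PySem.List.combinations_cons_succ, PySem.List.combinations_one,
        List.all_append, List.map_map, List.all_map]
      have hcast : ((a : Int) + 1) = ((a + 1 : Nat) : Int) := by push_cast; ring
      rw [hcast, ihn (whole.length - (a + 1)) (by omega) (a + 1) rfl]
      rw [List.drop_eq_getElem_cons ha]
      show (((PySem.List.pyRange ((a + 1 : Nat) : Int) (whole.length : Int) 1).all
          (fun j => match PySem.List.pyGet? whole (a : Int), PySem.List.pyGet? whole j with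
                    | some v1, some v2 => PySem.Set.contains E (v1, v2)
                    | _, _ => false))
          && _) = _
      have hget : PySem.List.pyGet? whole (a : Int) = some whole[a] := by
        simp [PySem.List.pyGet?_natCast, List.getElem?_eq_getElem ha]
      have hf : (fun j => match PySem.List.pyGet? whole (a : Int), PySem.List.pyGet? whole j with
                    | some v1, some v2 => PySem.Set.contains E (v1, v2)
                    | _, _ => false)
            = (fun j => match PySem.List.pyGet? whole j with
                    | some v => PySem.Set.contains E (whole[a], v)
                    | none => false) := by
        funext j; rw [hget]; cases PySem.List.pyGet? whole j <;> rfl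
      rw [hf]
      rw [all_pyRange_pyGet whole (fun v => PySem.Set.contains E (whole[a], v)) (a + 1)]
      simp [goodE]

-- ===== VERDICT (by name: the statement is the Claim_ definition above) =====
theorem clique_simplices_spec : Claim_equal_clique_simplices := by
  intro edges n d _ hpre
  unfold Spec_clique_simplices clique_simplices clique_simplices_alt
  rw [PySem.List.foldl_append_if_eq_filter, List.nil_append,
    cliqueExtend_eq _ _ _ hpre]
  apply List.filter_congr
  intro sim hsim
  have hlen : sim.length = (d + 1).toNat :=
    PySem.List.length_of_mem_combinations hsim
  have hd : (d + 1 : Int) = ((sim.length : Nat) : Int) := by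
    rw [hlen, Int.toNat_of_nonneg hpre]
  rw [hd, show (0 : Int) = ((0 : Nat) : Int) from rfl,
    all_pairs_eq_goodE (PySem.Set.ofList edges) sim 0, List.drop_zero]
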